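-- pv_equiv track=rewrite | github.com/bigbanonos/bigbanonos-hugo | fix_tags.py | find_yaml
-- ===== SOURCE A (Python) =====
-- def find_yaml(lines):
--     s = e = -1
--     for i in range(min(80, len(lines))):
--         if lines[i].strip() == "---":
--             s = i; break
--     if s < 0: return -1,-1
--     for j in range(s+1, min(120, len(lines))):
--         if lines[j].strip() == "---":
--             e = j; break
--     return s, e
-- ===== SOURCE B (Python) =====
-- def find_yaml(lines):
--     markers = [i for i in range(min(120, len(lines))) if lines[i].strip() == "---"]
--     s = markers[0] if markers and markers[0] < 80 else -1
--     if s < 0: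
--         return -1, -1
--     e = markers[1] if len(markers) > 1 else -1
--     return s, e
-- ===== Notes on version B (the rewrite author's own statement) =====
-- stated objective: alternative
-- what changed: Replaces A's two sequential early-exit scans (one for the start delimiter in the first 80 lines, one for the end delimiter up to line 120) by a single comprehension collecting all delimiter indices in the first 120 lines followed by positional selection (markers[0] if < 80, markers[1]).
import Mathlib
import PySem

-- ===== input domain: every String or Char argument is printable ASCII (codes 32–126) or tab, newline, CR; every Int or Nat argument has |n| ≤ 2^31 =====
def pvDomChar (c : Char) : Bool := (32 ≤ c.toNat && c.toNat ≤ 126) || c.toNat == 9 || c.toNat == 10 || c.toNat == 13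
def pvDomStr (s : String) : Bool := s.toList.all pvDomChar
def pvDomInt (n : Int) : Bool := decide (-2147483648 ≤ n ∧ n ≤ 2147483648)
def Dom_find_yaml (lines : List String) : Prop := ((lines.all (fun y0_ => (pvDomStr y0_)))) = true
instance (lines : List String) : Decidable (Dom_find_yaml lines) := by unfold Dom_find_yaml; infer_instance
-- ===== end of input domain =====

-- B replaces A's two early-exit scans by one collection of all delimiter indices in the
-- first 120 lines followed by positional selection (objective: alternative decomposition).

-- ===== PORT A =====
-- two sequential searches with break, each ported as find? over the same range
def find_yaml (lines : List String) : Int × Int :=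
  let s : Int :=
    match (PySem.List.pyRange 0 (min 80 (lines.length : Int)) 1).find?
        (fun i => PySem.Str.strip (PySem.List.pyGetD lines i "") == "---") with
    | some i => i
    | none => -1
  if s < 0 then (-1, -1)
  else
    let e : Int :=
      match (PySem.List.pyRange (s + 1) (min 120 (lines.length : Int)) 1).find?
          (fun j => PySem.Str.strip (PySem.List.pyGetD lines j "") == "---") with
      | some j => j
      | none => -1
    (s, e)

-- ===== PORT B =====
-- one comprehension collecting all marker indices, then positional selection
def find_yaml_alt (lines : List String) : Int × Int :=
  let markers : List Int :=
    (PySem.List.pyRange 0 (min 120 (lines.length : Int)) 1).filter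
      (fun i => PySem.Str.strip (PySem.List.pyGetD lines i "") == "---")
  match markers with
  | [] => (-1, -1)
  | m0 :: rest =>
    if m0 < 80 then
      (m0, match rest with
           | [] => -1
           | m1 :: _ => m1)
    else (-1, -1)

-- ===== PRECONDITION & SPEC =====
def Spec_find_yaml (lines : List String) (out : Int × Int) : Prop := out = find_yaml_alt lines
instance (lines : List String) (out : Int × Int) : Decidable (Spec_find_yaml lines out) := by unfold Spec_find_yaml; infer_instance

-- ===== CLAIM (what is proved, stated in full; the proofs are below) =====
def Claim_equal_find_yaml : Prop := ∀ (lines : List String), Dom_find_yaml lines → Spec_find_yaml lines (find_yaml lines)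

-- ===== LEMMAS AND PROOFS =====

-- find? is the head of filter
theorem pv_find?_eq_head?_filter {α : Type} (p : α → Bool) (l : List α) :
    l.find? p = (l.filter p).head? := by
  induction l with
  | nil => rfl
  | cons x xs ih =>
    by_cases h : p x = true
    · rw [List.find?_cons_of_pos h, List.filter_cons_of_pos h, List.head?_cons]
    · rw [List.find?_cons_of_neg h, List.filter_cons_of_neg h]
      exact ih

-- if the first match in [a,b) is s, the filtered range is s followed by the filter of [s+1,b)
theorem pv_filter_range_of_find?_some (p : Int → Bool) :
    ∀ (k : Nat) (a b s : Int), (b - a).toNat = k →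
      (PySem.List.pyRange a b 1).find? p = some s →
      (PySem.List.pyRange a b 1).filter p = s :: (PySem.List.pyRange (s + 1) b 1).filter p := by
  intro k
  induction k with
  | zero =>
    intro a b s hk hf
    rw [PySem.List.pyRange_one_eq_nil (by omega), List.find?_nil] at hf
    exact (nomatch hf)
  | succ n ih =>
    intro a b s hk hf
    have hab : a < b := by omega
    rw [PySem.List.pyRange_one_cons hab] at hf ⊢
    by_cases hp : p a = true
    · rw [List.find?_cons_of_pos hp] at hf
      have hs : a = s := Option.some.inj hf
      subst hs
      rw [List.filter_cons_of_pos hp]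
    · rw [List.find?_cons_of_neg hp] at hf
      rw [List.filter_cons_of_neg hp]
      exact ih (a + 1) b s (by omega) hf

theorem find_yaml_eq_alt (lines : List String) : find_yaml lines = find_yaml_alt lines := by
  set p : Int → Bool := fun i => PySem.Str.strip (PySem.List.pyGetD lines i "") == "---" with hp
  set n : Int := (lines.length : Int) with hn
  have hn0 : 0 ≤ n := by positivity
  have hab : min 80 n ≤ min 120 n := by omega
  have ha0 : (0:Int) ≤ min 80 n := by omega
  unfold find_yaml find_yaml_alt
  rw [← hp, ← hn]
  cases hf : (PySem.List.pyRange 0 (min 80 n) 1).find? p with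
  | none =>
    -- A returns (-1,-1); B's markers all lie in [min 80 n, min 120 n), hence are ≥ 80
    have hnil : (PySem.List.pyRange 0 (min 80 n) 1).filter p = [] := by
      rw [← List.head?_eq_none_iff, ← pv_find?_eq_head?_filter]
      exact hf
    rw [PySem.List.pyRange_one_append 0 (min 80 n) (min 120 n) ha0 hab,
        List.filter_append, hnil, List.nil_append]
    cases hm : (PySem.List.pyRange (min 80 n) (min 120 n) 1).filter p with
    | nil => simp
    | cons m0 rest =>
      have hmem : m0 ∈ PySem.List.pyRange (min 80 n) (min 120 n) 1 := by
        have : m0 ∈ (PySem.List.pyRange (min 80 n) (min 120 n) 1).filter p := by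
          rw [hm]; exact List.mem_cons_self
        exact List.mem_of_mem_filter this
      rw [PySem.List.mem_pyRange_one] at hmem
      have h80 : (80:Int) ≤ m0 := by omega
      simp only [if_pos (show (-1:Int) < 0 by norm_num)]
      rw [if_neg (by omega)]
  | some s =>
    have hmem : s ∈ PySem.List.pyRange 0 (min 80 n) 1 := List.mem_of_find?_eq_some hf
    rw [PySem.List.mem_pyRange_one] at hmem
    have hs0 : 0 ≤ s := hmem.1
    have hs80 : s < 80 := by omega
    -- markers = s :: filter of [s+1, min 120 n)
    have hsplit : (PySem.List.pyRange 0 (min 120 n) 1).filter p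
        = s :: (PySem.List.pyRange (s + 1) (min 120 n) 1).filter p := by
      rw [PySem.List.pyRange_one_append 0 (min 80 n) (min 120 n) ha0 hab, List.filter_append,
          pv_filter_range_of_find?_some p ((min 80 n) - 0).toNat 0 (min 80 n) s rfl hf]
      rw [List.cons_append,
          ← List.filter_append,
          ← PySem.List.pyRange_one_append (s + 1) (min 80 n) (min 120 n) (by omega) hab]
    rw [hsplit]
    simp only [if_neg (by omega : ¬ s < 0), if_pos hs80]
    rw [pv_find?_eq_head?_filter p (PySem.List.pyRange (s + 1) (min 120 n) 1)]
    cases (PySem.List.pyRange (s + 1) (min 120 n) 1).filter p with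
    | nil => rfl
    | cons m1 _ => rfl

-- ===== VERDICT (by name: the statement is the Claim_ definition above) =====
theorem find_yaml_spec : Claim_equal_find_yaml := by
  intro lines _
  unfold Spec_find_yaml
  exact find_yaml_eq_alt lines
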